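-- pv_equiv track=rewrite | github.com/roccomoresi/archivosImportantes | tpsProgra/tpsAlgYEstr/04/06.py | filtrarPalabrasA
-- ===== SOURCE A (Python) =====
-- def filtrarPalabrasA(frase, n):
--     palabras = []
--     palabra = ""
--
--     for char in frase:
--         if char == " ":
--             if len(palabra) >= n:
--                 palabras.append(palabra)
--             palabra = ""
--         else:
--             palabra += char
--
--     if len(palabra) >= n:
--         palabras.append(palabra)
--
--     return " ".join(palabras)
-- ===== SOURCE B (Python) =====
-- def filtrarPalabrasA(frase, n):
--     return " ".join(w for w in frase.split(" ") if len(w) >= n)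
-- ===== Notes on version B (the rewrite author's own statement) =====
-- stated objective: idiomatic
-- what changed: Replaces the manual per-character tokenizer with accumulator state by split(" ") followed by a length filter and join.
import Mathlib
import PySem

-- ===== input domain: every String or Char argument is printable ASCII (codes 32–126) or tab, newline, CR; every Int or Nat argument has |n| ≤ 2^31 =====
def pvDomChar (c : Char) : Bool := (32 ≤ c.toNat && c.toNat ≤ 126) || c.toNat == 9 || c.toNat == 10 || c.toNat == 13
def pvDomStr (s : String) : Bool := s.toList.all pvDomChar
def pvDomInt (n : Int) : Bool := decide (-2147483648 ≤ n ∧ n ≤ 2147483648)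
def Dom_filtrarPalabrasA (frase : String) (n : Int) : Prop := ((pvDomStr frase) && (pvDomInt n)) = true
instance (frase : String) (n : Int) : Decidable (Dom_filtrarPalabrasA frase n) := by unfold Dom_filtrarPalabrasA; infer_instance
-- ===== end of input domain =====

-- B replaces A's per-character tokenizer (accumulator loop) by split(" ") + length filter + join; same cost, more idiomatic.


-- ===== PORT A =====
-- the for-loop over the characters of frase, state = (palabras, palabra)
def filtrarPalabrasA_go (n : Int) : List Char → List (List Char) → List Char → List (List Char)
  | [], palabras, palabra =>
      if n ≤ (palabra.length : Int) then palabras ++ [palabra] else palabras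
  | c :: rest, palabras, palabra =>
      if c = ' ' then
        filtrarPalabrasA_go n rest
          (if n ≤ (palabra.length : Int) then palabras ++ [palabra] else palabras) []
      else
        filtrarPalabrasA_go n rest palabras (palabra ++ [c])

def filtrarPalabrasA (frase : String) (n : Int) : String :=
  String.ofList (PySem.Chars.join [' '] (filtrarPalabrasA_go n frase.toList [] []))

-- ===== PORT B =====
def filtrarPalabrasA_alt (frase : String) (n : Int) : String :=
  String.ofList (PySem.Chars.join [' ']
    ((PySem.Chars.splitOn frase.toList [' ']).filter (fun w => decide (n ≤ (w.length : Int)))))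

-- ===== PRECONDITION & SPEC =====
def Spec_filtrarPalabrasA (frase : String) (n : Int) (out : String) : Prop := out = filtrarPalabrasA_alt frase n
instance (frase : String) (n : Int) (out : String) : Decidable (Spec_filtrarPalabrasA frase n out) := by unfold Spec_filtrarPalabrasA; infer_instance

-- ===== CLAIM (what is proved, stated in full; the proofs are below) =====
def Claim_equal_filtrarPalabrasA : Prop := ∀ (frase : String) (n : Int), Dom_filtrarPalabrasA frase n → Spec_filtrarPalabrasA frase n (filtrarPalabrasA frase n)

-- ===== LEMMAS AND PROOFS =====

-- proof-side characterization of splitting on a single space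
def spSplit : List Char → List (List Char)
  | [] => [[]]
  | c :: rest => if c = ' ' then [] :: spSplit rest else (spSplit rest).modifyHead (c :: ·)

lemma spSplit_ne_nil (l : List Char) : spSplit l ≠ [] := by
  cases l with
  | nil => simp [spSplit]
  | cons c rest =>
    simp only [spSplit]
    split_ifs <;> simp [List.modifyHead]
    cases h : spSplit rest with
    | nil => exact absurd h (spSplit_ne_nil rest)
    | cons w ws => simp

lemma splitOn_go_spec : ∀ (fuel : Nat) (l : List Char), l.length < fuel →
    ∀ (cur : List Char) (acc : List (List Char)),
    PySem.Chars.splitOn.go [' '] fuel l cur acc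
      = acc.reverse ++ (spSplit l).modifyHead (cur.reverse ++ ·) := by
  intro fuel
  induction fuel with
  | zero => intro l h cur acc; exact absurd h (Nat.not_lt_zero _)
  | succ fuel ih =>
    intro l h cur acc
    cases l with
    | nil => simp [PySem.Chars.splitOn.go, spSplit]
    | cons c rest =>
      have hrest : rest.length < fuel := Nat.lt_of_succ_lt_succ (by simpa using h)
      simp only [PySem.Chars.splitOn.go]
      by_cases hc : c = ' '
      · have hpre : [' '].isPrefixOf (c :: rest) = true := by simp [hc, List.isPrefixOf]
        simp only [hpre, if_true]
        rw [show List.drop [' '].length (c :: rest) = rest from rfl, ih rest hrest]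
        simp only [spSplit, if_pos hc, List.reverse_cons, List.reverse_nil, List.nil_append,
          List.append_assoc]
        cases hs : spSplit rest with
        | nil => exact absurd hs (spSplit_ne_nil rest)
        | cons w ws => simp only [List.modifyHead, List.append_nil, List.nil_append,
            List.cons_append]
      · have hpre : [' '].isPrefixOf (c :: rest) = false := by
          simp [List.isPrefixOf, Ne.symm hc]
        simp only [hpre, Bool.false_eq_true, if_false]
        rw [ih rest hrest]
        simp only [spSplit, if_neg hc]
        cases hs : spSplit rest with
        | nil => exact absurd hs (spSplit_ne_nil rest)
        | cons w ws => simp only [List.modifyHead, List.reverse_cons, List.append_assoc,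
            List.singleton_append]

lemma splitOn_space (l : List Char) : PySem.Chars.splitOn l [' '] = spSplit l := by
  unfold PySem.Chars.splitOn
  rw [splitOn_go_spec (l.length + 1) l (by omega) [] []]
  cases h : spSplit l with
  | nil => exact absurd h (spSplit_ne_nil l)
  | cons w ws => simp

lemma go_spec (n : Int) : ∀ (l : List Char) (ps : List (List Char)) (p : List Char),
    filtrarPalabrasA_go n l ps p
      = ps ++ ((spSplit l).modifyHead (p ++ ·)).filter (fun w => decide (n ≤ (w.length : Int))) := by
  intro l
  induction l with
  | nil =>
    intro ps p
    simp [filtrarPalabrasA_go, spSplit, List.filter]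
    split_ifs with h <;> simp [h]
  | cons c rest ih =>
    intro ps p
    simp only [filtrarPalabrasA_go]
    by_cases hc : c = ' '
    · subst hc
      rw [if_pos rfl, ih]
      simp only [spSplit, List.modifyHead, List.nil_append]
      cases hs : spSplit rest with
      | nil => exact absurd hs (spSplit_ne_nil rest)
      | cons w ws =>
        by_cases h : n ≤ (p.length : Int) <;>
          simp [List.filter_cons, h, List.append_assoc]
    · simp only [if_neg hc, ih, spSplit]
      cases hs : spSplit rest with
      | nil => exact absurd hs (spSplit_ne_nil rest)
      | cons w ws => simp [List.modifyHead, List.append_assoc]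

-- ===== VERDICT (by name: the statement is the Claim_ definition above) =====
theorem filtrarPalabrasA_spec : Claim_equal_filtrarPalabrasA := by
  intro frase n _
  show _ = _
  unfold filtrarPalabrasA filtrarPalabrasA_alt
  rw [go_spec, splitOn_space]
  cases h : spSplit frase.toList with
  | nil => exact absurd h (spSplit_ne_nil frase.toList)
  | cons w ws => simp [List.modifyHead]
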